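-- pv_equiv track=rewrite | github.com/brunseba/rh-ove-ecosystem | scripts/convert_docs_to_docx_with_filter.py | adjust_heading_levels
-- ===== SOURCE A (Python) =====
-- def adjust_heading_levels(content: str, level_adjustment: int = 0) -> str:
--     """Adjust markdown heading levels."""
--     if level_adjustment == 0:
--         return content
--
--     lines = content.split('\n')
--     adjusted_lines = []
--
--     for line in lines:
--         if line.startswith('#'):
--             # Count current heading level
--             current_level = 0
--             for char in line:
--                 if char == '#':
--                     current_level += 1
--                 else:
--                     break
--
--             # Extract heading text
--             heading_text = line[current_level:].strip()
--
--             # Calculate new level (minimum 1, maximum 6)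
--             new_level = max(1, min(6, current_level + level_adjustment))
--
--             # Create new heading
--             new_heading = '#' * new_level + ' ' + heading_text
--             adjusted_lines.append(new_heading)
--         else:
--             adjusted_lines.append(line)
--
--     return '\n'.join(adjusted_lines)
-- ===== SOURCE B (Python) =====
-- def adjust_heading_levels(content: str, level_adjustment: int = 0) -> str:
--     """Adjust markdown heading levels (single forward scan, no split/join of lines)."""
--     if level_adjustment == 0:
--         return content
--
--     out = []
--     i, n = 0, len(content)
--     while i < n:
--         if content[i] == '#':
--             j = i
--             while j < n and content[j] == '#':
--                 j += 1
--             k = j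
--             while k < n and content[k] != '\n':
--                 k += 1
--             new_level = max(1, min(6, (j - i) + level_adjustment))
--             out.append('#' * new_level + ' ' + content[j:k].strip())
--             i = k
--         else:
--             k = i
--             while k < n and content[k] != '\n':
--                 k += 1
--             out.append(content[i:k])
--             i = k
--         if i < n:          # consume the newline, keep it verbatim
--             out.append('\n')
--             i += 1
--     return ''.join(out)
-- ===== Notes on version B (the rewrite author's own statement) =====
-- stated objective: alternative
-- what changed: B replaces the split-into-lines, per-line rebuild, join pipeline of A with a single forward index scan over the string that consumes each hash run, line remainder and newline in place, building the output as it goes.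
import Mathlib
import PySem

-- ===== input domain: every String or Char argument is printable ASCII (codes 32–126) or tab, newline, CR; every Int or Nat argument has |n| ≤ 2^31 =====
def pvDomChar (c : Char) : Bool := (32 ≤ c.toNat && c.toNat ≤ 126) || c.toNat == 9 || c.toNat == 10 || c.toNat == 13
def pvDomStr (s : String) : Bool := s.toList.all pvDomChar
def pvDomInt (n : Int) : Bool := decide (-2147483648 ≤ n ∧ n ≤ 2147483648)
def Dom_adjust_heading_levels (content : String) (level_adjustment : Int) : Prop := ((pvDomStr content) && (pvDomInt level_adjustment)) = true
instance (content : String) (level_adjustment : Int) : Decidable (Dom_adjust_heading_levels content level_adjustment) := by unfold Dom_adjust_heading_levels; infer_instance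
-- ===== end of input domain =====

-- B replaces A's split('\n') / per-line rebuild / join('\n') with one forward scan over the
-- string that consumes the hash run, the line remainder and the newline in place (alternative
-- decomposition, same cost class).

-- ===== PORT A =====
-- inner 'for char in line: … break' counting loop of A
def aCountHashes : List Char → Nat
  | [] => 0
  | c :: rest => if c == '#' then aCountHashes rest + 1 else 0

-- body of A's for-loop over lines
def aAdjustLine (level_adjustment : Int) (line : List Char) : List Char :=
  if PySem.Chars.startswith line ['#'] then
    let current_level := aCountHashes line
    let heading_text := PySem.Chars.strip (PySem.List.slice line (some (current_level : Int)) none)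
    let new_level := max 1 (min 6 ((current_level : Int) + level_adjustment))
    PySem.List.pyRepeat ['#'] new_level ++ [' '] ++ heading_text
  else line

def adjust_heading_levels (content : String) (level_adjustment : Int) : String :=
  if level_adjustment == 0 then content
  else
    let lines := PySem.Chars.splitOn content.toList ['\n']
    let adjusted_lines := lines.foldl (fun acc line => acc ++ [aAdjustLine level_adjustment line]) []
    String.mk (PySem.Chars.join ['\n'] adjusted_lines)

-- ===== PORT B =====
-- one forward scan: hash run / rest of line / newline consumed in place
def bScan (level_adjustment : Int) : List Char → List Char
  | [] => []
  | c :: cs =>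
    if c == '#' then
      let after := List.dropWhile (· == '#') (c :: cs)
      let hashes := List.takeWhile (· == '#') (c :: cs)
      let text := List.takeWhile (· ≠ '\n') after
      let rest := List.dropWhile (· ≠ '\n') after
      let new_level := max 1 (min 6 ((hashes.length : Int) + level_adjustment))
      List.replicate new_level.toNat '#' ++ ' ' :: PySem.Chars.strip text ++
        (if _h : rest = [] then [] else '\n' :: bScan level_adjustment rest.tail)
    else
      let line := List.takeWhile (· ≠ '\n') (c :: cs)
      let rest := List.dropWhile (· ≠ '\n') (c :: cs)
      line ++
        (if _h : rest = [] then [] else '\n' :: bScan level_adjustment rest.tail)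
termination_by cs => cs.length
decreasing_by
  · have h1 : (List.dropWhile (· ≠ '\n') (List.dropWhile (· == '#') (c :: cs))).length
        ≤ (c :: cs).length :=
      le_trans (List.length_dropWhile_le _ _)
        (List.length_dropWhile_le _ _)
    simp only [List.length_tail, List.length_cons] at *
    omega
  · have h1 : (List.dropWhile (· ≠ '\n') (c :: cs)).length ≤ (c :: cs).length :=
      List.length_dropWhile_le _ _
    simp only [List.length_tail, List.length_cons] at *
    omega

def adjust_heading_levels_alt (content : String) (level_adjustment : Int) : String :=
  if level_adjustment == 0 then content
  else String.mk (bScan level_adjustment content.toList)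

-- ===== PRECONDITION & SPEC =====
def Spec_adjust_heading_levels (content : String) (level_adjustment : Int) (out : String) : Prop := out = adjust_heading_levels_alt content level_adjustment
instance (content : String) (level_adjustment : Int) (out : String) : Decidable (Spec_adjust_heading_levels content level_adjustment out) := by unfold Spec_adjust_heading_levels; infer_instance

-- ===== CLAIM (what is proved, stated in full; the proofs are below) =====
def Claim_equal_adjust_heading_levels : Prop := ∀ (content : String) (level_adjustment : Int), Dom_adjust_heading_levels content level_adjustment → Spec_adjust_heading_levels content level_adjustment (adjust_heading_levels content level_adjustment)

-- ===== LEMMAS AND PROOFS =====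

-- recursive characterisation of splitting on '\n'
def splitNL : List Char → List (List Char)
  | [] => [[]]
  | c :: cs => if c == '\n' then [] :: splitNL cs else (splitNL cs).modifyHead (c :: ·)

theorem modifyHead_comp {α : Type} (f g : α → α) (l : List α) :
    (l.modifyHead g).modifyHead f = l.modifyHead (fun x => f (g x)) := by
  cases l <;> simp

theorem splitNL_ne_nil (l : List Char) : splitNL l ≠ [] := by
  induction l with
  | nil => simp [splitNL]
  | cons c cs ih =>
    simp only [splitNL]
    split
    · simp
    · cases h : splitNL cs
      · exact absurd h ih
      · simp

theorem splitOn_go_eq (l : List Char) :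
    ∀ (fuel : Nat), l.length ≤ fuel → ∀ (cur : List Char) (acc : List (List Char)),
      PySem.Chars.splitOn.go ['\n'] fuel l cur acc
        = acc.reverse ++ (splitNL l).modifyHead (cur.reverse ++ ·) := by
  induction l with
  | nil =>
    intro fuel _ cur acc
    cases fuel <;> simp [PySem.Chars.splitOn.go, splitNL]
  | cons c cs ih =>
    intro fuel hf cur acc
    cases fuel with
    | zero => simp at hf
    | succ f =>
      simp only [List.length_cons] at hf
      by_cases hc : c = '\n'
      · subst hc
        have hpre : List.isPrefixOf ['\n'] ('\n' :: cs) = true := by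
          simp [List.isPrefixOf]
        simp only [PySem.Chars.splitOn.go, hpre, if_pos, List.length_cons, List.length_nil,
          List.drop_succ_cons, List.drop_zero, splitNL]
        rw [ih f (by omega)]
        simp only [if_pos (by simp : ('\n' == '\n') = true)]
        simp
        cases h : splitNL cs
        · exact absurd h (splitNL_ne_nil cs)
        · simp
      · have hpre : List.isPrefixOf ['\n'] (c :: cs) = false := by
          simp [List.isPrefixOf]; intro h; exact absurd h.symm hc
        simp only [PySem.Chars.splitOn.go, hpre, Bool.false_eq_true, if_false]
        rw [ih f (by omega)]
        simp only [splitNL, if_neg (by simp [hc] : ¬ (c == '\n') = true), modifyHead_comp]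
        congr 1
        congr 1
        funext x
        simp

theorem splitOn_eq_splitNL (cs : List Char) :
    PySem.Chars.splitOn cs ['\n'] = splitNL cs := by
  show PySem.Chars.splitOn.go ['\n'] (cs.length + 1) cs [] [] = _
  rw [splitOn_go_eq cs (cs.length + 1) (by omega)]
  cases h : splitNL cs
  · exact absurd h (splitNL_ne_nil cs)
  · simp

theorem aCountHashes_eq (l : List Char) :
    aCountHashes l = (l.takeWhile (· == '#')).length := by
  induction l with
  | nil => simp [aCountHashes]
  | cons c cs ih =>
    simp only [aCountHashes, List.takeWhile]
    by_cases h : c == '#' <;> simp [h, ih]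

theorem takeWhile_append_of_all {α : Type} (p : α → Bool) (xs ys : List α)
    (h : ∀ x ∈ xs, p x = true) :
    (xs ++ ys).takeWhile p = xs ++ ys.takeWhile p := by
  induction xs with
  | nil => simp
  | cons c cs ih =>
    simp only [List.cons_append, List.takeWhile, h c (by simp)]
    rw [ih (fun x hx => h x (by simp [hx]))]

theorem dropWhile_append_of_all {α : Type} (p : α → Bool) (xs ys : List α)
    (h : ∀ x ∈ xs, p x = true) :
    (xs ++ ys).dropWhile p = ys.dropWhile p := by
  induction xs with
  | nil => simp
  | cons c cs ih =>
    simp only [List.cons_append, List.dropWhile, h c (by simp)]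
    exact ih (fun x hx => h x (by simp [hx]))

theorem head_dropWhile_false {α : Type} (p : α → Bool) (l : List α) (a : α) (r : List α)
    (h : l.dropWhile p = a :: r) : p a = false := by
  induction l with
  | nil => simp at h
  | cons c cs ih =>
    by_cases hc : p c
    · simp [List.dropWhile, hc] at h; exact ih h
    · simp [List.dropWhile, hc] at h
      rw [← h.1]; simp [hc]

theorem splitNL_structure (l : List Char) :
    splitNL l =
      match l.dropWhile (· ≠ '\n') with
      | [] => [l.takeWhile (· ≠ '\n')]
      | _ :: r => l.takeWhile (· ≠ '\n') :: splitNL r := by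
  induction l with
  | nil => simp [splitNL]
  | cons c cs ih =>
    by_cases hc : c = '\n'
    · subst hc
      simp [splitNL, List.dropWhile, List.takeWhile]
    · have hne : (c ≠ '\n') = true := by simp [hc]
      simp only [splitNL, if_neg (by simp [hc] : ¬ (c == '\n') = true),
        List.dropWhile, List.takeWhile, hne]
      rw [ih]
      cases h : cs.dropWhile (· ≠ '\n') <;> simp

theorem joinNL_cons_cons (a b : List Char) (t : List (List Char)) :
    PySem.Chars.join ['\n'] (a :: b :: t) = a ++ '\n' :: PySem.Chars.join ['\n'] (b :: t) := by
  simp [PySem.Chars.join, List.intercalate, List.intersperse]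

theorem joinNL_singleton (a : List Char) :
    PySem.Chars.join ['\n'] [a] = a := by
  simp [PySem.Chars.join, List.intercalate]

theorem joinNL_cons (a : List Char) (t : List (List Char)) (h : t ≠ []) :
    PySem.Chars.join ['\n'] (a :: t) = a ++ '\n' :: PySem.Chars.join ['\n'] t := by
  cases t with
  | nil => exact absurd rfl h
  | cons b t' => exact joinNL_cons_cons a b t'

-- the per-line value A computes on the heading branch, expressed through B's pieces
theorem aAdjustLine_heading (adj : Int) (hashes text : List Char)
    (hh : hashes ≠ []) (hall : ∀ x ∈ hashes, (x == '#') = true)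
    (hhead : ∀ a r, text = a :: r → (a == '#') = false) :
    aAdjustLine adj (hashes ++ text) =
      List.replicate (max 1 (min 6 ((hashes.length : Int) + adj))).toNat '#'
        ++ ' ' :: PySem.Chars.strip text := by
  have hstarts : PySem.Chars.startswith (hashes ++ text) ['#'] = true := by
    cases hashes with
    | nil => exact absurd rfl hh
    | cons c cs =>
      have hc : c = '#' := by simpa using hall c (by simp)
      simp [PySem.Chars.startswith, List.isPrefixOf, hc]
  have hcount : aCountHashes (hashes ++ text) = hashes.length := by
    rw [aCountHashes_eq, takeWhile_append_of_all _ _ _ hall]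
    have : text.takeWhile (· == '#') = [] := by
      cases ht : text with
      | nil => simp
      | cons a r => simp [List.takeWhile, hhead a r ht]
    simp [this]
  simp only [aAdjustLine, hstarts, if_pos, hcount]
  rw [PySem.List.slice_from _ (by positivity)]
  simp only [Int.toNat_natCast, List.drop_left]
  rw [PySem.List.pyRepeat_singleton]
  simp

theorem aAdjustLine_nonheading (adj : Int) (line : List Char)
    (h : ∀ a r, line = a :: r → (a == '#') = false) :
    aAdjustLine adj line = line := by
  cases line with
  | nil => simp [aAdjustLine, PySem.Chars.startswith, List.isPrefixOf]
  | cons a r =>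
    have ha := h a r rfl
    simp only [aAdjustLine, PySem.Chars.startswith, List.isPrefixOf]
    rw [if_neg]
    simp only [Bool.and_eq_true, beq_iff_eq]
    rintro ⟨h1, -⟩
    rw [← h1] at ha
    simp at ha

-- main bridge: B's scan equals "map A's line body over the '\n'-split, then join"
theorem bScan_eq (adj : Int) (cs : List Char) :
    bScan adj cs = PySem.Chars.join ['\n'] ((splitNL cs).map (aAdjustLine adj)) := by
  induction cs using bScan.induct adj with
  | case1 =>
    simp [bScan, splitNL, aAdjustLine, PySem.Chars.startswith, List.isPrefixOf]
  | case2 c cs hc afterL restL ihB =>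
    have hcs : c = '#' := by simpa using hc
    -- names for B's pieces
    set hashes := List.takeWhile (· == '#') (c :: cs) with hhashes
    set after := List.dropWhile (· == '#') (c :: cs) with hafter
    set text := List.takeWhile (· ≠ '\n') after with htext
    set rest := List.dropWhile (· ≠ '\n') after with hrest
    have hsplit : hashes ++ after = c :: cs := List.takeWhile_append_dropWhile
    have hhne : hashes ≠ [] := by
      rw [hhashes]; simp [List.takeWhile, hc]
    have hall : ∀ x ∈ hashes, (x == '#') = true := by
      intro x hx
      rw [hhashes] at hx
      exact List.mem_takeWhile_imp (p := fun y => y == '#') hx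
    have hallnl : ∀ x ∈ hashes, (decide (x ≠ '\n') : Bool) = true := by
      intro x hx
      have : x = '#' := by simpa using hall x hx
      simp [this]
    have hhead : ∀ a r, text = a :: r → (a == '#') = false := by
      intro a r ha
      cases haft : after with
      | nil => rw [htext, haft] at ha; simp at ha
      | cons b bs =>
        have hb : (b == '#') = false := head_dropWhile_false _ (c :: cs) b bs haft
        rw [htext] at ha
        rw [haft] at ha
        rw [List.takeWhile_cons] at ha
        by_cases hbn : b = '\n'
        · rw [if_neg (by simp [hbn])] at ha
          exact absurd ha (by simp)
        · rw [if_pos (by simp [hbn])] at ha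
          cases ha
          exact hb
    have htw : List.takeWhile (· ≠ '\n') (c :: cs) = hashes ++ text := by
      conv_lhs => rw [← hsplit]
      rw [takeWhile_append_of_all _ _ _ hallnl, htext]
    have hdw : List.dropWhile (· ≠ '\n') (c :: cs) = rest := by
      conv_lhs => rw [← hsplit]
      rw [dropWhile_append_of_all _ _ _ hallnl, hrest]
    have hline : aAdjustLine adj (hashes ++ text) =
        List.replicate (max 1 (min 6 ((hashes.length : Int) + adj))).toNat '#'
          ++ ' ' :: PySem.Chars.strip text :=
      aAdjustLine_heading adj hashes text hhne hall hhead
    rw [splitNL_structure (c :: cs)]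
    rw [bScan]
    simp only [hc, if_pos, ← hhashes, ← hafter, ← htext, ← hrest, htw, hdw]
    cases hr : rest with
    | nil =>
      simp only [dif_pos, List.map_cons, List.map_nil, joinNL_singleton, hline]
      simp
    | cons x r =>
      have hmapne : List.map (aAdjustLine adj) (splitNL r) ≠ [] := by
        simp [splitNL_ne_nil r]
      rw [dif_neg (by simp)]
      simp only [List.map_cons, joinNL_cons _ _ hmapne, hline]
      have hRL : restL = x :: r := hr
      have hI := ihB
      rw [hRL] at hI
      simp only [List.tail_cons] at hI
      rw [List.tail_cons, hI]
  | case3 c cs hc restL ihB =>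
    have hline : aAdjustLine adj (List.takeWhile (· ≠ '\n') (c :: cs))
        = List.takeWhile (· ≠ '\n') (c :: cs) := by
      apply aAdjustLine_nonheading
      intro a r h
      rw [List.takeWhile_cons] at h
      by_cases hcn : c = '\n'
      · rw [if_neg (by simp [hcn])] at h
        exact absurd h (by simp)
      · rw [if_pos (by simp [hcn])] at h
        cases h
        simpa using hc
    rw [splitNL_structure (c :: cs)]
    rw [bScan]
    simp only [hc, Bool.false_eq_true, if_false]
    cases hr : List.dropWhile (· ≠ '\n') (c :: cs) with
    | nil =>
      simp only [dif_pos, List.map_cons, List.map_nil, joinNL_singleton, hline]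
      simp
    | cons x r =>
      have hmapne : List.map (aAdjustLine adj) (splitNL r) ≠ [] := by
        simp [splitNL_ne_nil r]
      rw [dif_neg (by simp)]
      simp only [List.map_cons, joinNL_cons _ _ hmapne, hline]
      have hRL : restL = x :: r := hr
      have hI := ihB
      rw [hRL] at hI
      simp only [List.tail_cons] at hI
      rw [List.tail_cons, hI]

theorem foldl_append_map {α β : Type} (f : α → β) (l : List α) (acc : List β) :
    l.foldl (fun a x => a ++ [f x]) acc = acc ++ l.map f := by
  induction l generalizing acc with
  | nil => simp
  | cons c cs ih => simp [ih]

-- ===== VERDICT (by name: the statement is the Claim_ definition above) =====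
theorem adjust_heading_levels_spec : Claim_equal_adjust_heading_levels := by
  intro content adj _
  show _ = _
  unfold adjust_heading_levels adjust_heading_levels_alt
  by_cases h : adj == 0
  · simp [h]
  · simp only [h, Bool.false_eq_true, if_false]
    rw [splitOn_eq_splitNL, foldl_append_map, List.nil_append, bScan_eq]
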